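-- pv_equiv track=rewrite | github.com/hangunhee39/coding-Test | 프로그래머스/2/340212. ［PCCP 기출문제］ 2번 ／ 퍼즐 게임 챌린지/［PCCP 기출문제］ 2번 ／ 퍼즐 게임 챌린지.py | solution
-- ===== SOURCE A (Python) =====
-- def solution(diffs, times, limit):
--     start = 1
--     end = max(diffs)
--
--     answer = end
--
--     while start <= end :
--         mid = (start + end)//2
--         tmp = times[0]
--
--         for i in range(1, len(times)):
--             if mid >= diffs[i]:
--                 tmp += times[i]
--             else :
--                 tmp += (times[i] + times[i-1])*(diffs[i]-mid) + times[i]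
--
--         if limit >= tmp:
--             answer = mid
--             end = mid - 1
--         else :
--             start = mid + 1
--
--     return answer
-- ===== SOURCE B (Python) =====
-- def _upper(ds, x):
--     # first index j with ds[j] > x in the ascending-sorted list ds
--     lo, hi = 0, len(ds)
--     while lo < hi:
--         m = (lo + hi) // 2
--         if ds[m] <= x:
--             lo = m + 1
--         else:
--             hi = m
--     return lo
--
--
-- def solution(diffs, times, limit):
--     base = sum(times)
--     events = sorted(((diffs[i], times[i] + times[i - 1]) for i in range(1, len(times))),
--                     key=lambda e: e[0])
--     ds = [e[0] for e in events]
--     # suf[j] = (sum of w, sum of w*d) over events[j:]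
--     suf = [(0, 0)]
--     for d, w in reversed(events):
--         sw, swd = suf[-1]
--         suf.append((sw + w, swd + w * d))
--     suf.reverse()
--     start = 1
--     end = max(diffs)
--     answer = end
--     while start <= end:
--         mid = (start + end) // 2
--         j = _upper(ds, mid)
--         sw, swd = suf[j]
--         tmp = base + swd - mid * sw
--         if limit >= tmp:
--             answer = mid
--             end = mid - 1
--         else:
--             start = mid + 1
--     return answer
-- ===== Notes on version B (the rewrite author's own statement) =====
-- stated objective: alternative
-- what changed: A re-scans all n levels at every binary-search probe; B precomputes the sorted (difficulty, weight) breakpoints with suffix sums of weight and weight*difficulty once, and answers each probe of the same search in O(log n) by a hand-written bisection into that table.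
-- outside the precondition, e.g. on solution([0], [1, 2], 0): A returns 0, B raises IndexError
import Mathlib
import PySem

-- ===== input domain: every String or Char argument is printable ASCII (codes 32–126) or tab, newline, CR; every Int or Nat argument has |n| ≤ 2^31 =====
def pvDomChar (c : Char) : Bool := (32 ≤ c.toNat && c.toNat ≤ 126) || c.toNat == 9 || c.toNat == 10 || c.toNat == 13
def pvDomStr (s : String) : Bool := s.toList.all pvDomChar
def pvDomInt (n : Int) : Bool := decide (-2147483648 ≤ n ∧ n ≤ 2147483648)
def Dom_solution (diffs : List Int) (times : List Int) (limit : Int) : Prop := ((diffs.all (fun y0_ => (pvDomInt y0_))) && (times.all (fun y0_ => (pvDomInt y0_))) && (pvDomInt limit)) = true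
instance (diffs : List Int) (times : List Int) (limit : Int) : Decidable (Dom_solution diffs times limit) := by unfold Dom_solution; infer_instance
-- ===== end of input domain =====

-- A re-scans all n levels at every binary-search probe; B precomputes the sorted breakpoints with
-- suffix sums once and answers each probe of the same search by an O(log n) bisection
-- (objective: alternative).

-- ===== PORT A =====
-- inner for-loop of A: tmp starts at times[0] and accumulates over i in range(1, len(times))
def costA (diffs times : List Int) (mid : Int) : Int :=
  (PySem.List.pyRange 1 (times.length : Int) 1).foldl
    (fun tmp i =>
      if mid ≥ PySem.List.pyGetD diffs i 0 then
        tmp + PySem.List.pyGetD times i 0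
      else
        tmp + (PySem.List.pyGetD times i 0 + PySem.List.pyGetD times (i - 1) 0) *
              (PySem.List.pyGetD diffs i 0 - mid) + PySem.List.pyGetD times i 0)
    (PySem.List.pyGetD times 0 0)

-- A's while-loop (binary search), recursion on the shrinking interval
def loopA (diffs times : List Int) (limit start e ans : Int) : Int :=
  if h : start ≤ e then
    let mid := PySem.Int.floordiv (start + e) 2
    let tmp := costA diffs times mid
    if limit ≥ tmp then loopA diffs times limit start (mid - 1) mid
    else loopA diffs times limit (mid + 1) e ans
  else ans
termination_by (e + 1 - start).toNat
decreasing_by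
  · have := PySem.Int.floordiv_two_mid_bounds h; omega
  · have := PySem.Int.floordiv_two_mid_bounds h; omega

def solution (diffs : List Int) (times : List Int) (limit : Int) : Int :=
  let e := (PySem.List.max? diffs (fun x => x)).getD 0
  loopA diffs times limit 1 e e

-- ===== PORT B =====
-- B's helper _upper: while lo < hi bisection; first index j with ds[j] > x in ascending ds
def upperLoop (ds : List Int) (x lo hi : Int) : Int :=
  if h : lo < hi then
    let m := PySem.Int.floordiv (lo + hi) 2
    if PySem.List.pyGetD ds m 0 ≤ x then upperLoop ds x (m + 1) hi
    else upperLoop ds x lo m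
  else lo
termination_by (hi - lo).toNat
decreasing_by
  · have := PySem.Int.floordiv_two_mid_bounds (le_of_lt h); omega
  · have h1 := PySem.Int.floordiv_two_mid_bounds (le_of_lt h)
    have h2 : PySem.Int.floordiv (lo + hi) 2 < hi := by
      rw [PySem.Int.floordiv_lt_iff_lt_mul (by omega)]; omega
    omega

def upper (ds : List Int) (x : Int) : Int := upperLoop ds x 0 (ds.length : Int)

-- B's while-loop: same probe sequence as A, but each probe answered from the suffix-sum table
def loopB (ds : List Int) (suf : List (Int × Int)) (base limit start e ans : Int) : Int :=
  if h : start ≤ e then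
    let mid := PySem.Int.floordiv (start + e) 2
    let j := upper ds mid
    let p := PySem.List.pyGetD suf j (0, 0)
    let tmp := base + p.2 - mid * p.1
    if limit ≥ tmp then loopB ds suf base limit start (mid - 1) mid
    else loopB ds suf base limit (mid + 1) e ans
  else ans
termination_by (e + 1 - start).toNat
decreasing_by
  · have := PySem.Int.floordiv_two_mid_bounds h; omega
  · have := PySem.Int.floordiv_two_mid_bounds h; omega

def solution_alt (diffs : List Int) (times : List Int) (limit : Int) : Int :=
  let base := times.sum
  let events := PySem.List.sorted
    ((PySem.List.pyRange 1 (times.length : Int) 1).map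
      (fun i => (PySem.List.pyGetD diffs i 0,
                 PySem.List.pyGetD times i 0 + PySem.List.pyGetD times (i - 1) 0)))
    (fun e => e.1) false
  let ds := events.map (fun e => e.1)
  let suf := (events.reverse.foldl
    (fun acc (ev : Int × Int) =>
      let p := PySem.List.pyGetD acc (-1) (0, 0)
      acc ++ [(p.1 + ev.2, p.2 + ev.2 * ev.1)])
    [((0 : Int), (0 : Int))]).reverse
  let e := (PySem.List.max? diffs (fun x => x)).getD 0
  loopB ds suf base limit 1 e e

-- ===== PRECONDITION & SPEC =====
-- Pre_ excludes exactly the inputs on which a run raises: empty times (A hits times[0]),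
-- and diffs shorter than times (an IndexError on diffs[i] whenever the search loop runs;
-- in the degenerate max(diffs) < 1 case A skips its loop and returns, but B's precomputation
-- still raises there).
def Pre_solution (diffs : List Int) (times : List Int) (limit : Int) : Prop :=
  times ≠ [] ∧ times.length ≤ diffs.length
instance (diffs : List Int) (times : List Int) (limit : Int) : Decidable (Pre_solution diffs times limit) := by unfold Pre_solution; infer_instance

def pvWitness_solution : List Int × List Int × Int := ([2, 5, 4], [10, 1, 4], 30)

def Spec_solution (diffs : List Int) (times : List Int) (limit : Int) (out : Int) : Prop := out = solution_alt diffs times limit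
instance (diffs : List Int) (times : List Int) (limit : Int) (out : Int) : Decidable (Spec_solution diffs times limit out) := by unfold Spec_solution; infer_instance

-- ===== CLAIM (what is proved, stated in full; the proofs are below) =====
def Claim_equal_solution : Prop := ∀ (diffs : List Int) (times : List Int) (limit : Int), Dom_solution diffs times limit → Pre_solution diffs times limit → Spec_solution diffs times limit (solution diffs times limit)

-- ===== LEMMAS AND PROOFS =====

-- the unsorted breakpoint list (difficulty, weight) both programs derive from the input
def evList (diffs times : List Int) : List (Int × Int) :=
  (PySem.List.pyRange 1 (times.length : Int) 1).map
    (fun i => (PySem.List.pyGetD diffs i 0,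
               PySem.List.pyGetD times i 0 + PySem.List.pyGetD times (i - 1) 0))

-- extra cost beyond base = sum(times)
def Esum (L : List (Int × Int)) (mid : Int) : Int :=
  (L.map (fun ev => if mid < ev.1 then ev.2 * (ev.1 - mid) else 0)).sum

-- specification of B's suffix-sum table: sufList L ! j = sums over L.drop j
def sufList : List (Int × Int) → List (Int × Int)
  | [] => [(0, 0)]
  | ev :: t =>
    (((sufList t).headD (0, 0)).1 + ev.2, ((sufList t).headD (0, 0)).2 + ev.2 * ev.1) :: sufList t

theorem Esum_append (P L : List (Int × Int)) (mid : Int) :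
    Esum (P ++ L) mid = Esum P mid + Esum L mid := by
  simp [Esum]

theorem Esum_active (P : List (Int × Int)) (mid : Int) (h : ∀ ev ∈ P, mid < ev.1) :
    Esum P mid = (P.map (fun ev => ev.2 * ev.1)).sum - mid * (P.map (fun ev => ev.2)).sum := by
  induction P with
  | nil => simp [Esum]
  | cons a t ih =>
    have ha := h a (by simp)
    have ht : ∀ ev ∈ t, mid < ev.1 := fun ev hev => h ev (by simp [hev])
    simp only [Esum, List.map_cons, List.sum_cons] at *
    rw [if_pos ha, ih ht]
    ring

theorem Esum_inactive (L : List (Int × Int)) (mid : Int) (h : ∀ ev ∈ L, ev.1 ≤ mid) :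
    Esum L mid = 0 := by
  induction L with
  | nil => simp [Esum]
  | cons a t ih =>
    have ha := h a (by simp)
    have ht : ∀ ev ∈ t, ev.1 ≤ mid := fun ev hev => h ev (by simp [hev])
    simp only [Esum, List.map_cons, List.sum_cons] at *
    rw [if_neg (by omega), ih ht]
    simp

theorem foldl_add_body (l : List Int) (g : Int → Int) (init : Int)
    (f : Int → Int → Int) (hf : ∀ tmp i, f tmp i = tmp + g i) :
    l.foldl f init = init + (l.map g).sum := by
  induction l generalizing init with
  | nil => simp
  | cons a t ih => simp only [List.foldl_cons, List.map_cons, List.sum_cons, ih, hf]; ring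

theorem sum_map_add {α : Type} (l : List α) (f g : α → Int) :
    (l.map (fun x => f x + g x)).sum = (l.map f).sum + (l.map g).sum := by
  induction l with
  | nil => simp
  | cons a t ih => simp only [List.map_cons, List.sum_cons, ih]; ring

theorem costA_eq (diffs times : List Int) (mid : Int) (ht : times ≠ []) :
    costA diffs times mid = times.sum + Esum (evList diffs times) mid := by
  unfold costA
  rw [foldl_add_body _ (fun i =>
      (if mid ≥ PySem.List.pyGetD diffs i 0 then PySem.List.pyGetD times i 0
       else (PySem.List.pyGetD times i 0 + PySem.List.pyGetD times (i - 1) 0) *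
              (PySem.List.pyGetD diffs i 0 - mid) + PySem.List.pyGetD times i 0)) _ _
    (by intro tmp i; beta_reduce; split_ifs <;> ring)]
  have hsplit : ((PySem.List.pyRange 1 (times.length : Int) 1).map (fun i =>
      (if mid ≥ PySem.List.pyGetD diffs i 0 then PySem.List.pyGetD times i 0
       else (PySem.List.pyGetD times i 0 + PySem.List.pyGetD times (i - 1) 0) *
              (PySem.List.pyGetD diffs i 0 - mid) + PySem.List.pyGetD times i 0))) =
      ((PySem.List.pyRange 1 (times.length : Int) 1).map (fun i =>
        PySem.List.pyGetD times i 0 +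
        (if mid < PySem.List.pyGetD diffs i 0 then
          (PySem.List.pyGetD times i 0 + PySem.List.pyGetD times (i - 1) 0) *
              (PySem.List.pyGetD diffs i 0 - mid) else 0))) := by
    apply List.map_congr_left
    intro i _
    beta_reduce
    by_cases h : mid < PySem.List.pyGetD diffs i 0
    · rw [if_neg (by omega), if_pos h]; ring
    · rw [if_pos (by omega), if_neg h]; ring
  rw [hsplit, sum_map_add]
  have hdrop : ((PySem.List.pyRange 1 (times.length : Int) 1).map
      (fun i => PySem.List.pyGetD times i 0)) = times.drop 1 := by
    have := PySem.List.map_pyGetD_pyRange' times (0 : Int) (a := 1) (by omega)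
    simpa using this
  have hE : Esum (evList diffs times) mid = ((PySem.List.pyRange 1 (times.length : Int) 1).map
      (fun i => (if mid < PySem.List.pyGetD diffs i 0 then
          (PySem.List.pyGetD times i 0 + PySem.List.pyGetD times (i - 1) 0) *
              (PySem.List.pyGetD diffs i 0 - mid) else 0))).sum := by
    simp [Esum, evList, List.map_map, Function.comp_def]
  rw [hdrop, hE]
  obtain ⟨t, rest, rfl⟩ : ∃ t rest, times = t :: rest := by
    cases times with
    | nil => exact absurd rfl ht
    | cons t rest => exact ⟨t, rest, rfl⟩
  simp [PySem.List.pyGetD_zero_cons]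
  ring

-- monotone indexing of a sorted list via getD
theorem sorted_getD_mono (ds : List Int) (hs : ds.Pairwise (· ≤ ·)) (a b : Nat)
    (hab : a ≤ b) (hb : b < ds.length) : ds.getD a 0 ≤ ds.getD b 0 := by
  rcases Nat.lt_or_ge a b with h | h
  · have := (List.pairwise_iff_getElem.mp hs) a b (by omega) hb h
    rw [List.getD_eq_getElem ds 0 (by omega), List.getD_eq_getElem ds 0 hb]
    exact this
  · have : a = b := by omega
    subst this
    rfl

theorem upperLoop_spec (ds : List Int) (hs : ds.Pairwise (· ≤ ·)) (x : Int) :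
    ∀ (n : Nat) (lo hi : Int), (hi - lo).toNat = n → 0 ≤ lo → lo ≤ hi →
      hi ≤ (ds.length : Int) →
      (∀ k : Nat, (k : Int) < lo → ds.getD k 0 ≤ x) →
      (∀ k : Nat, hi ≤ (k : Int) → k < ds.length → x < ds.getD k 0) →
      (0 ≤ upperLoop ds x lo hi ∧ upperLoop ds x lo hi ≤ (ds.length : Int) ∧
       (∀ k : Nat, (k : Int) < upperLoop ds x lo hi → ds.getD k 0 ≤ x) ∧
       (∀ k : Nat, upperLoop ds x lo hi ≤ (k : Int) → k < ds.length → x < ds.getD k 0)) := by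
  intro n
  induction n using Nat.strong_induction_on with
  | _ n ih =>
    intro lo hi hn h0 hlh hhil hbelow habove
    rw [upperLoop]
    by_cases hlt : lo < hi
    · rw [dif_pos hlt]
      dsimp only
      have hb := PySem.Int.floordiv_two_mid_bounds (le_of_lt hlt)
      have hmhi : PySem.Int.floordiv (lo + hi) 2 < hi := by
        rw [PySem.Int.floordiv_lt_iff_lt_mul (by omega)]; omega
      have hmrange : 0 ≤ PySem.Int.floordiv (lo + hi) 2 ∧
          PySem.Int.floordiv (lo + hi) 2 < (ds.length : Int) := by omega
      have hgm : PySem.List.pyGetD ds (PySem.Int.floordiv (lo + hi) 2) 0 =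
          ds.getD (PySem.Int.floordiv (lo + hi) 2).toNat 0 := by
        rw [PySem.List.pyGetD_eq_getElem ds 0 hmrange.1 hmrange.2]
        rw [List.getD_eq_getElem ds 0 (by omega)]
      by_cases hcmp : PySem.List.pyGetD ds (PySem.Int.floordiv (lo + hi) 2) 0 ≤ x
      · rw [if_pos hcmp]
        refine ih (hi - (PySem.Int.floordiv (lo + hi) 2 + 1)).toNat (by omega)
          (PySem.Int.floordiv (lo + hi) 2 + 1) hi rfl (by omega) (by omega) hhil ?_ habove
        intro k hk
        by_cases hklo : (k : Int) < lo
        · exact hbelow k hklo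
        · have hmono := sorted_getD_mono ds hs k (PySem.Int.floordiv (lo + hi) 2).toNat
            (by omega) (by omega)
          rw [← hgm] at hmono
          omega
      · rw [if_neg hcmp]
        refine ih (PySem.Int.floordiv (lo + hi) 2 - lo).toNat (by omega) lo
          (PySem.Int.floordiv (lo + hi) 2) rfl h0 (by omega) (by omega) hbelow ?_
        intro k hk1 hk2
        have hmono := sorted_getD_mono ds hs (PySem.Int.floordiv (lo + hi) 2).toNat k
          (by omega) hk2
        rw [hgm] at hcmp
        omega
    · rw [dif_neg hlt]
      exact ⟨h0, by omega, fun k hk => hbelow k (by omega), fun k hk1 hk2 => habove k (by omega) hk2⟩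

theorem upper_spec (ds : List Int) (hs : ds.Pairwise (· ≤ ·)) (x : Int) :
    0 ≤ upper ds x ∧ upper ds x ≤ (ds.length : Int) ∧
    (∀ k : Nat, (k : Int) < upper ds x → ds.getD k 0 ≤ x) ∧
    (∀ k : Nat, upper ds x ≤ (k : Int) → k < ds.length → x < ds.getD k 0) := by
  unfold upper
  exact upperLoop_spec ds hs x ((ds.length : Int) - 0).toNat 0 (ds.length : Int) rfl
    (le_refl 0) (by omega) (le_refl _)
    (fun k hk => absurd hk (by omega))
    (fun k hk1 hk2 => absurd hk1 (by omega))

theorem sufList_ne_nil (L : List (Int × Int)) : sufList L ≠ [] := by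
  cases L <;> simp [sufList]

theorem sufList_length (L : List (Int × Int)) : (sufList L).length = L.length + 1 := by
  induction L with
  | nil => simp [sufList]
  | cons ev t ih => simp [sufList, ih]

theorem sufList_getD (L : List (Int × Int)) (k : Nat) (hk : k ≤ L.length) :
    (sufList L).getD k (0, 0) = (((L.drop k).map (fun e => e.2)).sum,
      ((L.drop k).map (fun e => e.2 * e.1)).sum) := by
  induction L generalizing k with
  | nil =>
    have : k = 0 := by simpa using hk
    subst this
    simp [sufList]
  | cons ev t ih =>
    cases k with
    | zero =>
      have hhead : (sufList t).headD (0, 0) = (sufList t).getD 0 (0, 0) := by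
        cases hst : sufList t with
        | nil => exact absurd hst (sufList_ne_nil t)
        | cons a u => simp
      have h0 := ih 0 (by omega)
      simp only [sufList, List.getD_cons_zero, hhead, h0]
      simp
      constructor <;> ring
    | succ k =>
      simp only [sufList, List.getD_cons_succ, List.drop_succ_cons]
      exact ih k (by simpa using hk)

theorem build_eq (L : List (Int × Int)) :
    (L.reverse.foldl
      (fun acc (ev : Int × Int) =>
        let p := PySem.List.pyGetD acc (-1) (0, 0)
        acc ++ [(p.1 + ev.2, p.2 + ev.2 * ev.1)])
      [((0 : Int), (0 : Int))]).reverse = sufList L := by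
  induction L with
  | nil => simp [sufList]
  | cons ev t ih =>
    have hA : t.reverse.foldl
        (fun acc (ev : Int × Int) =>
          let p := PySem.List.pyGetD acc (-1) (0, 0)
          acc ++ [(p.1 + ev.2, p.2 + ev.2 * ev.1)])
        [((0 : Int), (0 : Int))] = (sufList t).reverse := by
      rw [← ih]
      simp
    rw [List.reverse_cons, List.foldl_append, hA]
    simp only [List.foldl_cons, List.foldl_nil]
    have hne : (sufList t).reverse ≠ [] := by
      simp [sufList_ne_nil t]
    have hlast : PySem.List.pyGetD ((sufList t).reverse) (-1) (0, 0) =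
        (sufList t).headD (0, 0) := by
      rw [PySem.List.pyGetD_neg_one _ _ hne]
      rw [List.getLast_reverse hne]
      have hhd : ∀ (l : List (Int × Int)) (h : l ≠ []), l.head h = l.headD (0, 0) := by
        intro l h
        cases l with
        | nil => exact absurd rfl h
        | cons a u => rfl
      exact hhd _ _
    simp only [hlast]
    rw [List.reverse_append]
    simp [sufList]

-- the two while-loops agree once every probe is answered identically
theorem loop_eq (diffs times ds : List Int) (suf : List (Int × Int)) (base limit : Int)
    (hc : ∀ mid, base + (PySem.List.pyGetD suf (upper ds mid) (0, 0)).2 -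
        mid * (PySem.List.pyGetD suf (upper ds mid) (0, 0)).1 = costA diffs times mid) :
    ∀ (n : Nat) (s e ans : Int), (e + 1 - s).toNat = n →
      loopA diffs times limit s e ans = loopB ds suf base limit s e ans := by
  intro n
  induction n using Nat.strong_induction_on with
  | _ n ih =>
    intro s e ans hn
    rw [loopA, loopB]
    by_cases hse : s ≤ e
    · rw [dif_pos hse, dif_pos hse]
      dsimp only
      have hb := PySem.Int.floordiv_two_mid_bounds hse
      rw [hc (PySem.Int.floordiv (s + e) 2)]
      by_cases hfe : limit ≥ costA diffs times (PySem.Int.floordiv (s + e) 2)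
      · rw [if_pos hfe, if_pos hfe]
        exact ih (PySem.Int.floordiv (s + e) 2 - 1 + 1 - s).toNat (by omega) s
          (PySem.Int.floordiv (s + e) 2 - 1) (PySem.Int.floordiv (s + e) 2) rfl
      · rw [if_neg hfe, if_neg hfe]
        exact ih (e + 1 - (PySem.Int.floordiv (s + e) 2 + 1)).toNat (by omega)
          (PySem.Int.floordiv (s + e) 2 + 1) e ans rfl
    · rw [dif_neg hse, dif_neg hse]

theorem costB_eq (diffs times : List Int) (ht : times ≠ []) (mid : Int) :
    times.sum +
      (PySem.List.pyGetD (sufList (PySem.List.sorted (evList diffs times) (fun e => e.1) false))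
        (upper ((PySem.List.sorted (evList diffs times) (fun e => e.1) false).map (fun e => e.1))
          mid) (0, 0)).2 -
      mid *
      (PySem.List.pyGetD (sufList (PySem.List.sorted (evList diffs times) (fun e => e.1) false))
        (upper ((PySem.List.sorted (evList diffs times) (fun e => e.1) false).map (fun e => e.1))
          mid) (0, 0)).1 = costA diffs times mid := by
  have hperm : (PySem.List.sorted (evList diffs times) (fun e => e.1) false).Perm
      (evList diffs times) := PySem.List.sorted_perm _ _ _
  have hEq : Esum (PySem.List.sorted (evList diffs times) (fun e => e.1) false) mid =
      Esum (evList diffs times) mid := by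
    unfold Esum
    exact (hperm.map _).sum_eq
  have hsort : (((PySem.List.sorted (evList diffs times) (fun e => e.1) false)).map
      (fun e => e.1)).Pairwise (· ≤ ·) :=
    PySem.List.sorted_map_key_pairwise (evList diffs times) (fun e => e.1)
  obtain ⟨hj0, hjlen, hbel, habv⟩ := upper_spec _ hsort mid
  have hdslen : (((PySem.List.sorted (evList diffs times) (fun e => e.1) false)).map
      (fun e => e.1)).length =
      (PySem.List.sorted (evList diffs times) (fun e => e.1) false).length := by simp
  have hds : ∀ (k : Nat) (hk : k <
      (PySem.List.sorted (evList diffs times) (fun e => e.1) false).length),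
      (((PySem.List.sorted (evList diffs times) (fun e => e.1) false)).map
        (fun e => e.1)).getD k 0 =
      ((PySem.List.sorted (evList diffs times) (fun e => e.1) false)[k]).1 := by
    intro k hk
    rw [List.getD_eq_getElem _ _ (by simpa using hk)]
    simp
  have hjn : (upper (((PySem.List.sorted (evList diffs times) (fun e => e.1) false)).map
      (fun e => e.1)) mid).toNat ≤
      (PySem.List.sorted (evList diffs times) (fun e => e.1) false).length := by omega
  have hpg : PySem.List.pyGetD
      (sufList (PySem.List.sorted (evList diffs times) (fun e => e.1) false))
      (upper (((PySem.List.sorted (evList diffs times) (fun e => e.1) false)).map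
        (fun e => e.1)) mid) (0, 0) =
      (sufList (PySem.List.sorted (evList diffs times) (fun e => e.1) false)).getD
      (upper (((PySem.List.sorted (evList diffs times) (fun e => e.1) false)).map
        (fun e => e.1)) mid).toNat (0, 0) := by
    rw [PySem.List.pyGetD_eq_getElem _ _ hj0 (by rw [sufList_length]; push_cast; omega)]
    rw [List.getD_eq_getElem _ _ (by rw [sufList_length]; omega)]
  rw [hpg, sufList_getD _ _ hjn]
  rw [costA_eq diffs times mid ht, ← hEq]
  have hsplit : Esum (PySem.List.sorted (evList diffs times) (fun e => e.1) false) mid =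
      Esum ((PySem.List.sorted (evList diffs times) (fun e => e.1) false).take
          (upper (((PySem.List.sorted (evList diffs times) (fun e => e.1) false)).map
            (fun e => e.1)) mid).toNat ++
        (PySem.List.sorted (evList diffs times) (fun e => e.1) false).drop
          (upper (((PySem.List.sorted (evList diffs times) (fun e => e.1) false)).map
            (fun e => e.1)) mid).toNat) mid := by
    rw [List.take_append_drop]
  rw [hsplit, Esum_append]
  rw [Esum_inactive _ mid ?_, Esum_active _ mid ?_]
  · dsimp only
    ring
  · -- drop part: all difficulties > mid
    intro ev hev
    obtain ⟨k, hk, hkeq⟩ := List.getElem_of_mem hev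
    rw [List.getElem_drop] at hkeq
    rw [List.length_drop] at hk
    have hlen2 : (upper (((PySem.List.sorted (evList diffs times) (fun e => e.1) false)).map
        (fun e => e.1)) mid).toNat + k <
        (PySem.List.sorted (evList diffs times) (fun e => e.1) false).length := by omega
    have hthis := habv ((upper (((PySem.List.sorted (evList diffs times) (fun e => e.1)
        false)).map (fun e => e.1)) mid).toNat + k) (by push_cast; omega) (by omega)
    rw [hds _ hlen2] at hthis
    exact (congrArg Prod.fst hkeq) ▸ hthis
  · -- take part: all difficulties ≤ mid
    intro ev hev
    obtain ⟨k, hk, hkeq⟩ := List.getElem_of_mem hev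
    rw [List.getElem_take] at hkeq
    rw [List.length_take] at hk
    have hklt : k < (upper (((PySem.List.sorted (evList diffs times) (fun e => e.1) false)).map
        (fun e => e.1)) mid).toNat := by omega
    have hthis := hbel k (by omega)
    rw [hds k (by omega)] at hthis
    exact (congrArg Prod.fst hkeq) ▸ hthis

theorem solution_spec : Claim_equal_solution := by
  intro diffs times limit _hdom hpre
  obtain ⟨ht, hlen⟩ := hpre
  unfold Spec_solution
  have htlen : 1 ≤ times.length := by
    cases times with
    | nil => exact absurd rfl ht
    | cons a t => simp
  have hdne : diffs ≠ [] := by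
    intro h
    subst h
    simp at hlen
    exact ht hlen
  obtain ⟨M, hM⟩ : ∃ M, PySem.List.max? diffs (fun x => x) = some M := by
    cases hq : PySem.List.max? diffs (fun x => x) with
    | none => exact absurd ((PySem.List.max?_eq_none_iff diffs _).mp hq) hdne
    | some M => exact ⟨M, rfl⟩
  have hevl : ((PySem.List.pyRange 1 (times.length : Int) 1).map
      (fun i => (PySem.List.pyGetD diffs i 0,
                 PySem.List.pyGetD times i 0 + PySem.List.pyGetD times (i - 1) 0))) =
      evList diffs times := rfl
  have hsolA : solution diffs times limit = loopA diffs times limit 1 M M := by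
    unfold solution
    rw [hM]
    rfl
  have halt : solution_alt diffs times limit =
      loopB (((PySem.List.sorted (evList diffs times) (fun e => e.1) false)).map (fun e => e.1))
        (sufList (PySem.List.sorted (evList diffs times) (fun e => e.1) false))
        times.sum limit 1 M M := by
    unfold solution_alt
    rw [hM, hevl]
    dsimp only
    rw [build_eq]
    rfl
  rw [hsolA, halt]
  exact loop_eq diffs times _ _ times.sum limit (fun mid => costB_eq diffs times ht mid)
    (M + 1 - 1).toNat 1 M M rfl
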